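-- pv_equiv track=rewrite | github.com/jeury301/python-morsels | 14. lstrip/lstrip_solutions.py | v1_lstrip
-- ===== SOURCE A (Python) =====
-- def v1_lstrip(iterable, strip_value):
--     """Return iterable with strip_value items removed from beginning."""
--     stripped = []
--     is_beginning = True
--     for item in iterable:
--         if is_beginning and item == strip_value:
--             continue
--         is_beginning = False
--         stripped.append(item)
--     return stripped
-- ===== SOURCE B (Python) =====
-- def v1_lstrip(iterable, strip_value):
--     """Return iterable with strip_value items removed from beginning."""
--     items = list(iterable)
--     i = 0
--     while i < len(items) and items[i] == strip_value:
--         i += 1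
--     return items[i:]
-- ===== Notes on version B (the rewrite author's own statement) =====
-- stated objective: simpler
-- what changed: Replaced the flag-driven append-each-element loop with materialize-then-find-boundary-index-then-slice: scan for the first index not equal to strip_value and return items[i:].
import Mathlib
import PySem

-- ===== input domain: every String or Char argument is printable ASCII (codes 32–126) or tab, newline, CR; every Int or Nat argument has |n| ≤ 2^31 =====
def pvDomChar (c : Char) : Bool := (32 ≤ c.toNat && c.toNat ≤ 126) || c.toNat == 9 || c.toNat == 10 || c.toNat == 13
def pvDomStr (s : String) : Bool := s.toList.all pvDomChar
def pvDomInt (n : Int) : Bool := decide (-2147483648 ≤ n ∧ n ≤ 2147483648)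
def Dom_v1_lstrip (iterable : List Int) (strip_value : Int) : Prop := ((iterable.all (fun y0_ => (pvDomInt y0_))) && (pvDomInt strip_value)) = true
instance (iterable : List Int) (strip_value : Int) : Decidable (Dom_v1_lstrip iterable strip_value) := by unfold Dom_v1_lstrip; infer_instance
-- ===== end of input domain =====

-- B replaces A's flag-driven append loop by building the list, locating the first
-- non-strip index, and slicing from there (objective: simpler decomposition).

-- ===== PORT A =====
-- A's loop: state (stripped, is_beginning); 'continue' keeps the state unchanged.
def v1_lstrip (iterable : List Int) (strip_value : Int) : List Int :=
  (iterable.foldl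
    (fun (st : List Int × Bool) item =>
      if st.2 && (item == strip_value) then st
      else (st.1 ++ [item], false))
    ([], true)).1

-- ===== PORT B =====
-- B's while loop: advance i while items[i] == strip_value.
def pvBoundary (items : List Int) (strip_value : Int) : Nat :=
  match items with
  | [] => 0
  | x :: xs => if x == strip_value then pvBoundary xs strip_value + 1 else 0

def v1_lstrip_alt (iterable : List Int) (strip_value : Int) : List Int :=
  iterable.drop (pvBoundary iterable strip_value)

-- ===== PRECONDITION & SPEC =====
def Spec_v1_lstrip (iterable : List Int) (strip_value : Int) (out : List Int) : Prop := out = v1_lstrip_alt iterable strip_value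
instance (iterable : List Int) (strip_value : Int) (out : List Int) : Decidable (Spec_v1_lstrip iterable strip_value out) := by unfold Spec_v1_lstrip; infer_instance

-- ===== CLAIM (what is proved, stated in full; the proofs are below) =====
def Claim_equal_v1_lstrip : Prop := ∀ (iterable : List Int) (strip_value : Int), Dom_v1_lstrip iterable strip_value → Spec_v1_lstrip iterable strip_value (v1_lstrip iterable strip_value)

-- ===== LEMMAS AND PROOFS =====

-- Once the flag is false, A's loop appends every remaining item.
theorem pv_foldl_false (v : Int) (l acc : List Int) :
    (l.foldl (fun (st : List Int × Bool) item =>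
        if st.2 && (item == v) then st else (st.1 ++ [item], false)) (acc, false)).1
      = acc ++ l := by
  induction l generalizing acc with
  | nil => simp
  | cons x xs ih =>
    rw [List.foldl_cons]
    have hstep : (if ((acc, false) : List Int × Bool).2 && (x == v) then ((acc, false) : List Int × Bool)
        else ((acc, false).1 ++ [x], false)) = (acc ++ [x], false) := by
      simp
    rw [hstep, ih]
    simp

theorem pv_main (v : Int) (l : List Int) :
    v1_lstrip l v = v1_lstrip_alt l v := by
  induction l with
  | nil => rfl
  | cons x xs ih =>
    by_cases h : x = v
    · have hstep : (if (([], true) : List Int × Bool).2 && (x == v) then (([], true) : List Int × Bool)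
          else (([], true).1 ++ [x], false)) = ([], true) := by simp [h]
      calc v1_lstrip (x :: xs) v = v1_lstrip xs v := by
            unfold v1_lstrip; rw [List.foldl_cons, hstep]
        _ = v1_lstrip_alt xs v := ih
        _ = v1_lstrip_alt (x :: xs) v := by
            simp [v1_lstrip_alt, pvBoundary, h, List.drop_succ_cons]
    · have hstep : (if (([], true) : List Int × Bool).2 && (x == v) then (([], true) : List Int × Bool)
          else (([], true).1 ++ [x], false)) = ([x], false) := by simp [h]
      unfold v1_lstrip v1_lstrip_alt
      rw [List.foldl_cons, hstep, pv_foldl_false]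
      simp [pvBoundary, h]

-- ===== VERDICT (by name: the statement is the Claim_ definition above) =====
theorem v1_lstrip_spec : Claim_equal_v1_lstrip := by
  intro iterable strip_value _
  exact pv_main strip_value iterable
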